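-- pv_equiv track=rewrite | github.com/yanastasia/Data_Mining_23-24 | 855362_nPuzzle.py | generate_goal
-- ===== SOURCE A (Python) =====
-- def generate_goal(ind, dim):
--     i = int(ind/dim) # coordinate for 0
--     j = int(ind%dim) # coordinate for 0
--
--     matrix = [[-1] * dim for _ in range(dim)]
--     matrix[i][j] = 0
--     current_value = 1 # to start from 1
--
--     for x in range(dim):
--         for y in range(dim):
--             if  matrix[x][y] == 0:
--                 continue
--             matrix[x][y] = current_value
--             current_value += 1
--     return matrix
-- ===== SOURCE B (Python) =====
-- def generate_goal(ind, dim):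
--     i = int(ind/dim)
--     j = int(ind%dim)
--     p = (i % dim) * dim + j
--     matrix = [[k + 1 if k < p else k for k in range(x*dim, x*dim + dim)]
--               for x in range(dim)]
--     matrix[i][j] = 0
--     return matrix
-- ===== Notes on version B (the rewrite author's own statement) =====
-- stated objective: simpler
-- what changed: B derives each cell's value arithmetically from its linear index (k+1 before the blank's position p, k after) in a single comprehension and then places the 0 by the same indexed assignment, replacing A's -1 prefill plus a second full pass with a skip branch and a running counter.
import Mathlib
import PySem

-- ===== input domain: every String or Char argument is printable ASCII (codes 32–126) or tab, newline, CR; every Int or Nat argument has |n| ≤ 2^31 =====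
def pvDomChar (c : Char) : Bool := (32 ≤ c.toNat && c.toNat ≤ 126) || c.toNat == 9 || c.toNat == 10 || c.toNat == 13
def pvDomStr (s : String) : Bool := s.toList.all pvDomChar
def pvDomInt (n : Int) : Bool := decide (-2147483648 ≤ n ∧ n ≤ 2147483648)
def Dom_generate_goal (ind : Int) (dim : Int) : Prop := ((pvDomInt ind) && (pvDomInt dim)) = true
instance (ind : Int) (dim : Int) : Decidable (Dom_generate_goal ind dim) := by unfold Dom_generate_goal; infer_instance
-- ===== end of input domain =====

-- B builds the goal matrix in one comprehension from each cell's linear index instead of A's -1 prefill plus a counting second pass; equal return values on all of Pre_.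


-- ===== PORT A =====
-- int(ind/dim) is PySem.Int.truncdiv (exact for |ind|,|dim| < 2^53, which Dom guarantees);
-- matrix[i][j] = 0 (possibly negative i) is pyGetD/pySetD, in range on all of Pre_.
def generate_goal (ind : Int) (dim : Int) : List (List Int) :=
  let i := PySem.Int.truncdiv ind dim
  let j := PySem.Int.mod ind dim
  let matrix : List (List Int) :=
    (PySem.List.pyRange 0 dim 1).map (fun _ => PySem.List.pyRepeat [(-1 : Int)] dim)
  let matrix := PySem.List.pySetD matrix i (PySem.List.pySetD (PySem.List.pyGetD matrix i []) j 0)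
  let st : List (List Int) × Int :=
    (PySem.List.pyRange 0 dim 1).foldl (fun st x =>
      (PySem.List.pyRange 0 dim 1).foldl (fun (st : List (List Int) × Int) y =>
        if PySem.List.pyGetD (PySem.List.pyGetD st.1 x []) y (-1) = 0 then st
        else (PySem.List.pySetD st.1 x (PySem.List.pySetD (PySem.List.pyGetD st.1 x []) y st.2), st.2 + 1))
        st)
      (matrix, 1)
  st.1

-- ===== PORT B =====
def generate_goal_alt (ind : Int) (dim : Int) : List (List Int) :=
  let i := PySem.Int.truncdiv ind dim
  let j := PySem.Int.mod ind dim
  let p := PySem.Int.mod i dim * dim + j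
  let matrix : List (List Int) :=
    (PySem.List.pyRange 0 dim 1).map (fun x =>
      (PySem.List.pyRange (x * dim) (x * dim + dim) 1).map (fun k => if k < p then k + 1 else k))
  PySem.List.pySetD matrix i (PySem.List.pySetD (PySem.List.pyGetD matrix i []) j 0)

-- ===== PRECONDITION & SPEC =====
-- Pre_ is exactly the set of inputs on which the Python A returns: dim ≥ 1 (else ZeroDivisionError
-- or IndexError on the empty matrix) and ind such that matrix[int(ind/dim)] is in range
-- (-dim ≤ int(ind/dim) < dim, i.e. -dim*dim - dim < ind < dim*dim); outside it A raises.
def Pre_generate_goal (ind : Int) (dim : Int) : Prop :=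
  1 ≤ dim ∧ -(dim * dim) - dim < ind ∧ ind < dim * dim
instance (ind : Int) (dim : Int) : Decidable (Pre_generate_goal ind dim) := by
  unfold Pre_generate_goal; infer_instance
def pvWitness_generate_goal : Int × Int := (3, 2)
def Spec_generate_goal (ind : Int) (dim : Int) (out : List (List Int)) : Prop := out = generate_goal_alt ind dim
instance (ind : Int) (dim : Int) (out : List (List Int)) : Decidable (Spec_generate_goal ind dim out) := by unfold Spec_generate_goal; infer_instance

-- ===== CLAIM (what is proved, stated in full; the proofs are below) =====
def Claim_equal_generate_goal : Prop := ∀ (ind : Int) (dim : Int), Dom_generate_goal ind dim → Pre_generate_goal ind dim → Spec_generate_goal ind dim (generate_goal ind dim)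

-- ===== LEMMAS AND PROOFS =====

-- proof-side machinery: both ports are reduced to the same closed-form matrix
-- (range n).map (pvFrow n rn jn), where n = dim.toNat, rn = wrapped blank row, jn = blank column.

-- the closed form: row x, cell y holds 0 at the blank, k+1 left of it, k right of it (k = x*n+y)
def pvFrow (n rn jn x : Nat) : List Int :=
  (List.range n).map (fun y =>
    if x = rn ∧ y = jn then 0
    else if x * n + y < rn * n + jn then ((x * n + y : Nat) : Int) + 1
    else ((x * n + y : Nat) : Int))

-- A's matrix right after matrix[i][j] = 0
def pvIrow (n jn x rn : Nat) : List Int :=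
  if x = rn then (List.replicate n (-1 : Int)).set jn 0 else List.replicate n (-1 : Int)

-- A's counter before processing row m
def pvCnt (n rn m : Nat) : Int :=
  if rn < m then ((m * n : Nat) : Int) else 1 + ((m * n : Nat) : Int)

-- one cell of A's second pass, row-local state
def pvRstep (st : List Int × Int) (y : Nat) : List Int × Int :=
  if st.1.getD y (-1) = 0 then st else (st.1.set y st.2, st.2 + 1)

-- one cell of A's second pass, whole-matrix state, row x
def pvInnerf (x : Nat) (st : List (List Int) × Int) (y : Nat) : List (List Int) × Int :=
  if (st.1.getD x []).getD y (-1) = 0 then st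
  else (st.1.set x ((st.1.getD x []).set y st.2), st.2 + 1)

theorem pv_getD_append_len (xs ys : List Int) (y d : Int) :
    (xs ++ y :: ys).getD xs.length d = y := by
  simp [List.getD]

theorem pv_set_append_len {α : Type} (xs ys : List α) (y v : α) :
    (xs ++ y :: ys).set xs.length v = xs ++ v :: ys := by
  rw [List.set_append_right _ _ (le_refl _)]
  simp

theorem pv_rstep_block : ∀ (t : Nat) (pre post : List Int) (c : Int),
    (List.range' pre.length t).foldl pvRstep (pre ++ List.replicate t (-1) ++ post, c)
    = (pre ++ (List.range t).map (fun k : Nat => c + (k : Int)) ++ post, c + t) := by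
  intro t
  induction t with
  | zero => intro pre post c; simp
  | succ t ih =>
    intro pre post c
    rw [List.range'_succ, List.foldl_cons]
    have hstep : pvRstep (pre ++ List.replicate (t+1) (-1) ++ post, c) pre.length
        = ((pre ++ [c]) ++ List.replicate t (-1) ++ post, c + 1) := by
      unfold pvRstep
      rw [List.replicate_succ]
      simp only [List.append_assoc, List.cons_append]
      rw [pv_getD_append_len]
      simp only [if_neg (by norm_num : (-1 : Int) ≠ 0)]
      rw [pv_set_append_len]
      simp
    rw [hstep]
    have hlen : pre.length + 1 = (pre ++ [c]).length := by simp
    rw [hlen, ih (pre ++ [c]) post (c + 1)]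
    simp only [Prod.mk.injEq]
    refine ⟨?_, by push_cast; ring⟩
    rw [List.range_succ_eq_map, List.map_cons, List.map_map]
    have hfun : ((fun k : Nat => c + (k : Int)) ∘ Nat.succ) = (fun k : Nat => c + 1 + (k : Int)) := by
      funext k
      simp only [Function.comp_apply]
      push_cast
      ring
    rw [hfun]
    simp

theorem pv_row_plain (n : Nat) (c : Int) :
    (List.range n).foldl pvRstep (List.replicate n (-1 : Int), c)
    = ((List.range n).map (fun k : Nat => c + (k : Int)), c + n) := by
  have h := pv_rstep_block n [] [] c
  simpa [List.range_eq_range'] using h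

theorem pv_row_zero (n jn : Nat) (c : Int) (hj : jn < n) :
    (List.range n).foldl pvRstep ((List.replicate n (-1 : Int)).set jn 0, c)
    = ((List.range n).map (fun y : Nat => if y = jn then 0 else if y < jn then c + (y : Int) else c + (y : Int) - 1),
       c + n - 1) := by
  obtain ⟨t, ht⟩ : ∃ t, n = jn + t + 1 := ⟨n - 1 - jn, by omega⟩
  subst ht
  -- the row with its 0 made explicit
  have hrow : (List.replicate (jn + t + 1) (-1 : Int)).set jn 0
      = List.replicate jn (-1 : Int) ++ (0 : Int) :: List.replicate t (-1 : Int) := by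
    have h1 : jn + t + 1 = jn + (t + 1) := by omega
    rw [h1, List.replicate_add, List.replicate_succ]
    have h := pv_set_append_len (List.replicate jn (-1 : Int)) (List.replicate t (-1 : Int)) (-1) 0
    simpa using h
  -- the index range split at jn
  have hrange : List.range (jn + t + 1)
      = List.range' 0 jn ++ jn :: List.range' (jn + 1) t := by
    rw [List.range_eq_range']
    rw [show jn + t + 1 = jn + (1 + t) by omega, ← List.range'_append (s := 0) (m := jn) (n := 1 + t) (step := 1)]
    simp only [Nat.zero_add, Nat.one_mul, show 1 + t = t + 1 from by omega, List.range'_succ]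
  rw [hrow]
  conv_lhs => rw [hrange]
  rw [List.foldl_append, List.foldl_cons]
  -- phase 1: fill cells 0..jn-1
  have h1 := pv_rstep_block jn [] ((0 : Int) :: List.replicate t (-1 : Int)) c
  simp only [List.length_nil, List.nil_append] at h1
  rw [show List.range' 0 jn = List.range' 0 jn 1 from rfl]
  rw [h1]
  -- phase 2: skip the 0 cell
  have hg : (((List.range jn).map (fun k : Nat => c + (k : Int))) ++ (0 : Int) :: List.replicate t (-1 : Int)).getD jn (-1) = 0 := by
    have h := pv_getD_append_len ((List.range jn).map (fun k : Nat => c + (k : Int))) (List.replicate t (-1 : Int)) 0 (-1)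
    simpa using h
  have h2 : pvRstep ((List.range jn).map (fun k : Nat => c + (k : Int)) ++ (0 : Int) :: List.replicate t (-1 : Int), c + jn) jn
      = ((List.range jn).map (fun k : Nat => c + (k : Int)) ++ (0 : Int) :: List.replicate t (-1 : Int), c + jn) := by
    unfold pvRstep
    rw [if_pos hg]
  rw [h2]
  -- phase 3: fill cells jn+1..n-1
  have hsplit : (List.range jn).map (fun k : Nat => c + (k : Int)) ++ (0 : Int) :: List.replicate t (-1 : Int)
      = ((List.range jn).map (fun k : Nat => c + (k : Int)) ++ [(0 : Int)]) ++ List.replicate t (-1 : Int) ++ [] := by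
    simp
  have hlen3 : List.range' (jn + 1) t
      = List.range' ((List.range jn).map (fun k : Nat => c + (k : Int)) ++ [(0 : Int)]).length t 1 := by
    simp
  rw [hsplit, hlen3, pv_rstep_block t _ [] (c + jn)]
  refine Prod.ext ?_ (by push_cast; ring)
  -- list part
  apply List.ext_getElem
  · simp; omega
  · intro k hk1 hk2
    simp only [List.getElem_append, List.getElem_map, List.getElem_range, List.length_append,
      List.length_map, List.length_range, List.length_cons, List.length_nil, List.append_nil,
      List.getElem_cons]
    split_ifs <;> push_cast <;> omega

theorem pv_set_map_range {α : Type} (n k : Nat) (f : Nat → α) (v : α) :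
    ((List.range n).map f).set k v = (List.range n).map (fun x => if x = k then v else f x) := by
  apply List.ext_getElem
  · simp
  · intro m h1 h2
    simp only [List.getElem_set, List.getElem_map, List.getElem_range]
    by_cases h : k = m
    · rw [if_pos h, if_pos (by omega)]
    · rw [if_neg h, if_neg (by omega)]

theorem pv_inner_set : ∀ (l : List Nat) (x : Nat) (m : List (List Int)) (row : List Int) (c : Int),
    x < m.length →
    l.foldl (pvInnerf x) (m.set x row, c)
    = (m.set x (l.foldl pvRstep (row, c)).1, (l.foldl pvRstep (row, c)).2) := by
  intro l
  induction l with
  | nil => intro x m row c hx; simp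
  | cons y l ih =>
    intro x m row c hx
    rw [List.foldl_cons, List.foldl_cons]
    have hget : ((m.set x row, c) : List (List Int) × Int).1.getD x [] = row := by
      simp [List.getD, List.getElem?_set_self (by simpa using hx)]
    by_cases h0 : row.getD y (-1) = 0
    · have e1 : pvInnerf x (m.set x row, c) y = (m.set x row, c) := by
        unfold pvInnerf
        rw [hget, if_pos h0]
      have e2 : pvRstep (row, c) y = (row, c) := by
        unfold pvRstep; rw [if_pos h0]
      rw [e1, e2, ih x m row c hx]
    · have e1 : pvInnerf x (m.set x row, c) y = (m.set x (row.set y c), c + 1) := by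
        unfold pvInnerf
        rw [hget, if_neg h0]
        simp [List.set_set]
      have e2 : pvRstep (row, c) y = (row.set y c, c + 1) := by
        unfold pvRstep; rw [if_neg h0]
      rw [e1, e2, ih x m (row.set y c) (c + 1) hx]

theorem pv_rowcalc (n rn jn k : Nat) (hr : rn < n) (hj : jn < n) :
    (List.range n).foldl pvRstep (pvIrow n jn k rn, pvCnt n rn k)
    = (pvFrow n rn jn k, pvCnt n rn (k + 1)) := by
  by_cases hkr : k = rn
  · subst hkr
    unfold pvIrow
    rw [if_pos rfl, pv_row_zero n jn _ hj]
    unfold pvFrow pvCnt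
    rw [if_neg (lt_irrefl k), if_pos (Nat.lt_succ_self k)]
    refine Prod.ext ?_ ?_
    · apply List.map_congr_left
      intro y hy
      have hyn : y < n := List.mem_range.mp hy
      by_cases h1 : y = jn
      · simp [h1]
      · rw [if_neg h1, if_neg (show ¬(k = k ∧ y = jn) from fun h => h1 h.2)]
        by_cases h2 : y < jn
        · rw [if_pos h2, if_pos (Nat.add_lt_add_left h2 _)]
          push_cast
          ring
        · rw [if_neg h2, if_neg (fun hc => h2 (Nat.lt_of_add_lt_add_left hc))]
          push_cast
          ring
    · push_cast
      ring
  · unfold pvIrow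
    rw [if_neg hkr, pv_row_plain]
    unfold pvFrow pvCnt
    by_cases hlt : k < rn
    · rw [if_neg (by omega), if_neg (by omega)]
      refine Prod.ext ?_ (by push_cast; ring)
      apply List.map_congr_left
      intro y hy
      have hyn : y < n := List.mem_range.mp hy
      have hcond : k * n + y < rn * n + jn := by
        have : (k + 1) * n ≤ rn * n := Nat.mul_le_mul_right n (by omega)
        calc k * n + y < k * n + n := by omega
          _ = (k + 1) * n := by ring
          _ ≤ rn * n := this
          _ ≤ rn * n + jn := by omega
      rw [if_neg (by omega), if_pos hcond]
      push_cast
      ring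
    · have hgt : rn < k := by omega
      rw [if_pos hgt, if_pos (by omega)]
      refine Prod.ext ?_ (by push_cast; ring)
      apply List.map_congr_left
      intro y hy
      have hyn : y < n := List.mem_range.mp hy
      have hcond : ¬ (k * n + y < rn * n + jn) := by
        have : (rn + 1) * n ≤ k * n := Nat.mul_le_mul_right n (by omega)
        have h2 : rn * n + jn < (rn + 1) * n := by
          have : rn * n + jn < rn * n + n := by omega
          calc rn * n + jn < rn * n + n := this
            _ = (rn + 1) * n := by ring
        omega
      rw [if_neg (by omega), if_neg hcond]
      push_cast
      ring

theorem pv_outer (n rn jn : Nat) (hr : rn < n) (hj : jn < n) :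
    ∀ (t k : Nat), k + t = n →
    (List.range' k t).foldl (fun st x => (List.range n).foldl (pvInnerf x) st)
      ((List.range n).map (fun x => if x < k then pvFrow n rn jn x else pvIrow n jn x rn), pvCnt n rn k)
    = ((List.range n).map (pvFrow n rn jn), pvCnt n rn n) := by
  intro t
  induction t with
  | zero =>
    intro k hk
    have hkn : k = n := by omega
    subst hkn
    rw [List.range'_zero, List.foldl_nil]
    congr 1
    apply List.map_congr_left
    intro x hx
    rw [if_pos (List.mem_range.mp hx)]
  | succ t ih =>
    intro k hk
    have hkn : k < n := by omega
    rw [List.range'_succ, List.foldl_cons]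
    have hM : ((List.range n).map (fun x => if x < k then pvFrow n rn jn x else pvIrow n jn x rn)).set k (pvIrow n jn k rn)
        = (List.range n).map (fun x => if x < k then pvFrow n rn jn x else pvIrow n jn x rn) := by
      rw [pv_set_map_range]
      apply List.map_congr_left
      intro x hx
      by_cases hxk : x = k
      · subst hxk; rw [if_pos rfl, if_neg (lt_irrefl x)]
      · rw [if_neg hxk]
    have hstep : (List.range n).foldl (pvInnerf k)
        ((List.range n).map (fun x => if x < k then pvFrow n rn jn x else pvIrow n jn x rn), pvCnt n rn k)
        = ((List.range n).map (fun x => if x < k + 1 then pvFrow n rn jn x else pvIrow n jn x rn), pvCnt n rn (k + 1)) := by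
      rw [← hM]
      rw [pv_inner_set (List.range n) k _ _ _ (by simpa using hkn)]
      rw [pv_rowcalc n rn jn k hr hj]
      rw [pv_set_map_range]
      congr 1
      apply List.map_congr_left
      intro x hx
      by_cases hxk : x = k
      · subst hxk; rw [if_pos rfl, if_pos (by omega)]
      · rw [if_neg hxk]
        by_cases hxlt : x < k
        · rw [if_pos hxlt, if_pos (by omega)]
        · rw [if_neg hxlt, if_neg (by omega)]
    rw [hstep]
    exact ih (k + 1) (by omega)

-- resolved wrap index of i in a list of length len
theorem pv_pyIdx (len : Nat) (i : Int) (h1 : -(len : Int) ≤ i) (h2 : i < len) :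
    PySem.List.pyIdx? len i = some (if 0 ≤ i then i.toNat else len - (-i).toNat) := by
  unfold PySem.List.pyIdx?
  split_ifs with ha hb hc <;> first | rfl | omega

theorem pv_mod_wrap (dim i : Int) (h0 : 0 < dim) (h1 : -dim ≤ i) (h2 : i < dim) :
    PySem.Int.mod i dim = if 0 ≤ i then i else i + dim := by
  rw [PySem.Int.mod_eq_emod_of_pos h0]
  split_ifs with h
  · exact Int.emod_eq_of_lt h h2
  · have : (i + dim) % dim = i % dim := by
      have := Int.add_mul_emod_self_left (a := i) (b := dim) (c := 1)
      simpa using this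
    rw [← this]
    exact Int.emod_eq_of_lt (by omega) (by omega)

-- tdiv bounds from Pre_
theorem pv_tdiv_bounds (ind dim : Int) (h1 : 1 ≤ dim) (h2 : -(dim * dim) - dim < ind)
    (h3 : ind < dim * dim) : -dim ≤ ind.tdiv dim ∧ ind.tdiv dim < dim := by
  have hd : 0 < dim := by omega
  rw [Int.tdiv_eq_ediv]
  by_cases hp : 0 ≤ ind ∨ dim ∣ ind
  · rw [if_pos hp, add_zero]
    rcases hp with hp | hp
    · constructor
      · have : (0 : Int) ≤ ind / dim := Int.ediv_nonneg hp (by omega)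
        omega
      · exact (Int.ediv_lt_iff_lt_mul hd).mpr (by nlinarith)
    · obtain ⟨q, hq⟩ := hp
      subst hq
      rw [Int.mul_ediv_cancel_left _ (by omega)]
      constructor <;> nlinarith
  · rw [if_neg hp, Int.sign_eq_one_of_pos hd]
    push Not at hp
    obtain ⟨hneg, hnd⟩ := hp
    constructor
    · have : -(dim + 1) ≤ ind / dim := (Int.le_ediv_iff_mul_le hd).mpr (by nlinarith)
      omega
    · have : ind / dim < 0 := (Int.ediv_lt_iff_lt_mul hd).mpr (by omega)
      omega

-- wrap-index access on a list of length n: it is .getD rn / .set rn with rn = (i mod dim).toNat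
theorem pv_wrap_set {α : Type} (xs : List α) (dim i : Int) (v : α) (hlen : (xs.length : Int) = dim)
    (h1 : -dim ≤ i) (h2 : i < dim) :
    PySem.List.pySetD xs i v = xs.set (PySem.Int.mod i dim).toNat v := by
  have h0 : 0 < dim := by omega
  unfold PySem.List.pySetD PySem.List.pySet?
  rw [show xs.length = dim.toNat by omega]
  rw [pv_pyIdx dim.toNat i (by omega) (by omega)]
  rw [pv_mod_wrap dim i h0 h1 h2]
  split_ifs <;> simp <;> congr 1 <;> omega

theorem pv_wrap_get {α : Type} (xs : List α) (dim i : Int) (d : α) (hlen : (xs.length : Int) = dim)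
    (h1 : -dim ≤ i) (h2 : i < dim) :
    PySem.List.pyGetD xs i d = xs.getD (PySem.Int.mod i dim).toNat d := by
  have h0 : 0 < dim := by omega
  unfold PySem.List.pyGetD PySem.List.pyGet?
  rw [show xs.length = dim.toNat by omega]
  rw [pv_pyIdx dim.toNat i (by omega) (by omega)]
  rw [pv_mod_wrap dim i h0 h1 h2]
  split_ifs <;> simp [List.getD] <;> congr 2 <;> omega

theorem pv_A_eq (ind dim : Int) (h1 : 1 ≤ dim)
    (hi1 : -dim ≤ PySem.Int.truncdiv ind dim) (hi2 : PySem.Int.truncdiv ind dim < dim) :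
    generate_goal ind dim
    = (List.range dim.toNat).map
        (pvFrow dim.toNat (PySem.Int.mod (PySem.Int.truncdiv ind dim) dim).toNat
          (PySem.Int.mod ind dim).toNat) := by
  have h0 : (0 : Int) < dim := by omega
  set n := dim.toNat with hn
  have hdim : (n : Int) = dim := by omega
  set i := PySem.Int.truncdiv ind dim with hi
  set j := PySem.Int.mod ind dim with hj
  set rn := (PySem.Int.mod i dim).toNat with hrn
  set jn := j.toNat with hjn
  have hj0 : 0 ≤ j := PySem.Int.mod_nonneg ind h0
  have hjlt : j < dim := PySem.Int.mod_lt ind h0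
  have hjnn : jn < n := by omega
  have hrn0 : 0 ≤ PySem.Int.mod i dim := PySem.Int.mod_nonneg i h0
  have hrnlt : PySem.Int.mod i dim < dim := PySem.Int.mod_lt i h0
  have hrnn : rn < n := by omega
  unfold generate_goal
  simp only [← hi, ← hj]
  -- initial matrix of -1 rows
  rw [show PySem.List.pyRange 0 dim 1 = PySem.List.pyRange 0 dim from rfl]
  rw [PySem.List.pyRange_one, PySem.List.pyRepeat_singleton]
  simp only [List.map_map, sub_zero, ← hn]
  rw [show ((fun _ => List.replicate n (-1 : Int)) ∘ fun k : Nat => (0 : Int) + (k : Int))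
      = (fun _ : Nat => List.replicate n (-1 : Int)) from rfl]
  -- the 0 assignment
  have hlen0 : (((List.range n).map (fun _ : Nat => List.replicate n (-1 : Int))).length : Int) = dim := by
    simp [hdim]
  rw [pv_wrap_get _ dim i [] hlen0 hi1 hi2, pv_wrap_set _ dim i _ hlen0 hi1 hi2]
  rw [PySem.List.pySetD_of_nonneg _ _ hj0]
  rw [List.getD_eq_getElem _ _ (by simpa using hrnn), List.getElem_map, ← hjn]
  rw [pv_set_map_range]
  simp only [List.foldl_map, zero_add, PySem.List.pyGetD_natCast, PySem.List.pySetD_natCast]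
  have hout := pv_outer n rn jn hrnn hjnn n 0 (by omega)
  simp only [← List.range_eq_range', Nat.not_lt_zero, if_false, pvCnt, Nat.zero_mul,
    Nat.cast_zero, add_zero] at hout
  exact congrArg Prod.fst hout

theorem pv_B_eq (ind dim : Int) (h1 : 1 ≤ dim)
    (hi1 : -dim ≤ PySem.Int.truncdiv ind dim) (hi2 : PySem.Int.truncdiv ind dim < dim) :
    generate_goal_alt ind dim
    = (List.range dim.toNat).map
        (pvFrow dim.toNat (PySem.Int.mod (PySem.Int.truncdiv ind dim) dim).toNat
          (PySem.Int.mod ind dim).toNat) := by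
  have h0 : (0 : Int) < dim := by omega
  set n := dim.toNat with hn
  have hdim : (n : Int) = dim := by omega
  set i := PySem.Int.truncdiv ind dim with hi
  set j := PySem.Int.mod ind dim with hj
  set rn := (PySem.Int.mod i dim).toNat with hrn
  set jn := j.toNat with hjn
  have hj0 : 0 ≤ j := PySem.Int.mod_nonneg ind h0
  have hjlt : j < dim := PySem.Int.mod_lt ind h0
  have hjnn : jn < n := by omega
  have hrn0 : 0 ≤ PySem.Int.mod i dim := PySem.Int.mod_nonneg i h0
  have hrnlt : PySem.Int.mod i dim < dim := PySem.Int.mod_lt i h0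
  have hrnn : rn < n := by omega
  have hp : PySem.Int.mod i dim * dim + j = ((rn * n + jn : Nat) : Int) := by
    push_cast
    rw [hrn, hjn]
    rw [Int.toNat_of_nonneg hrn0, Int.toNat_of_nonneg hj0, hdim]
  unfold generate_goal_alt
  simp only [← hi, ← hj]
  rw [hp]
  -- the comprehension matrix as a map over Nat rows
  rw [show PySem.List.pyRange 0 dim 1 = PySem.List.pyRange 0 dim from rfl]
  rw [PySem.List.pyRange_one]
  simp only [List.map_map, sub_zero, ← hn]
  have hrow : ∀ x : Nat,
      ((fun x => (PySem.List.pyRange (x * dim) (x * dim + dim)).map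
          (fun k => if k < ((rn * n + jn : Nat) : Int) then k + 1 else k)) ∘ fun k : Nat => (0 : Int) + (k : Int)) x
      = (List.range n).map (fun y : Nat =>
          if ((x * n + y : Nat) : Int) < ((rn * n + jn : Nat) : Int)
          then ((x * n + y : Nat) : Int) + 1 else ((x * n + y : Nat) : Int)) := by
    intro x
    simp only [Function.comp_apply, zero_add]
    rw [PySem.List.pyRange_one, List.map_map]
    rw [show ((x : Int) * dim + dim - (x : Int) * dim) = dim by ring, ← hn]
    apply List.map_congr_left
    intro y hy
    simp only [Function.comp_apply]
    have : (x : Int) * dim + (y : Int) = ((x * n + y : Nat) : Int) := by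
      push_cast [← hdim]
      ring
    rw [this]
  rw [List.map_congr_left (fun x _ => hrow x)]
  -- the 0 assignment
  rw [pv_wrap_get _ dim i [] (by simp [hdim]) hi1 hi2, pv_wrap_set _ dim i _ (by simp [hdim]) hi1 hi2]
  rw [PySem.List.pySetD_of_nonneg _ _ hj0]
  rw [List.getD_eq_getElem _ _ (by simpa using hrnn), List.getElem_map, List.getElem_range, ← hjn]
  rw [pv_set_map_range, pv_set_map_range]
  apply List.map_congr_left
  intro x hx
  have hxn : x < n := List.mem_range.mp hx
  unfold pvFrow
  by_cases hxr : x = rn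
  · rw [hxr, if_pos rfl]
    apply List.map_congr_left
    intro y hy
    by_cases hyj : y = jn
    · rw [if_pos hyj, if_pos ⟨rfl, hyj⟩]
    · rw [if_neg hyj, if_neg (show ¬(rn = rn ∧ y = jn) from fun h => hyj h.2)]
      by_cases hc : rn * n + y < rn * n + jn
      · rw [if_pos (show ((rn * n + y : Nat) : Int) < ((rn * n + jn : Nat) : Int) from by exact_mod_cast hc), if_pos hc]
      · rw [if_neg (show ¬ ((rn * n + y : Nat) : Int) < ((rn * n + jn : Nat) : Int) from by exact_mod_cast hc), if_neg hc]
  · rw [if_neg hxr]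
    apply List.map_congr_left
    intro y hy
    rw [if_neg (show ¬(x = rn ∧ y = jn) from fun h => hxr h.1)]
    by_cases hc : x * n + y < rn * n + jn
    · rw [if_pos (show ((x * n + y : Nat) : Int) < ((rn * n + jn : Nat) : Int) from by exact_mod_cast hc), if_pos hc]
    · rw [if_neg (show ¬ ((x * n + y : Nat) : Int) < ((rn * n + jn : Nat) : Int) from by exact_mod_cast hc), if_neg hc]

-- ===== VERDICT (by name: the statement is the Claim_ definition above) =====
theorem generate_goal_spec : Claim_equal_generate_goal := by
  intro ind dim _ hpre
  obtain ⟨h1, h2, h3⟩ := hpre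
  have hb := pv_tdiv_bounds ind dim h1 h2 h3
  unfold Spec_generate_goal
  rw [pv_A_eq ind dim h1 hb.1 hb.2, pv_B_eq ind dim h1 hb.1 hb.2]
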